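-- pv_equiv track=rewrite | github.com/szczor/uzytki_ampl | visualization.py | create_lists
-- ===== SOURCE A (Python) =====
-- def create_lists(li):
--     lista1, lista2, lista3 = [], [], []
--     for str in li:
--         str = str.split(',')
--         lista1.append(str[0])
--         lista2.append(str[1])
--         lista3.append(str[2])
--     return lista1, lista2, lista3
-- ===== SOURCE B (Python) =====
-- def create_lists(li):
--     # Locate the first three commas by index arithmetic and slice the three
--     # fields out directly; no split list is ever built and commas past the
--     # third are ignored.
--     lista1, lista2, lista3 = [], [], []
--     for s in li:
--         i = s.index(',')
--         j = s.index(',', i + 1)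
--         k = s.find(',', j + 1)
--         lista1.append(s[:i])
--         lista2.append(s[i + 1:j])
--         lista3.append(s[j + 1:] if k == -1 else s[j + 1:k])
--     return lista1, lista2, lista3
-- ===== Notes on version B (the rewrite author's own statement) =====
-- stated objective: alternative
-- what changed: Instead of splitting every row into a field list and indexing it, B locates the first three commas with str.find and slices the three fields out of the string directly, never materialising a split list and ignoring everything past the third comma.
import Mathlib
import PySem

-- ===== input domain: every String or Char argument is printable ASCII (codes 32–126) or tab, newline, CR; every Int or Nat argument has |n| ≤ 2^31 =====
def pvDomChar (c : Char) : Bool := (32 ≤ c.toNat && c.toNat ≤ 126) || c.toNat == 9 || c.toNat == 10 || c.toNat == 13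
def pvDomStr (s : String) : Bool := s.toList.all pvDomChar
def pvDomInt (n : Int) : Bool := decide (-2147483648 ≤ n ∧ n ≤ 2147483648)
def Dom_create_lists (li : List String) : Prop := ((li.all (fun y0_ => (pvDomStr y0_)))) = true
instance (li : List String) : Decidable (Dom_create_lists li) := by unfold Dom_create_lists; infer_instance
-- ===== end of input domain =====

-- B locates the first three commas with str.find and slices the fields out directly
-- instead of A's split-then-index; return value only, no argument is mutated.

-- ===== PORT A =====
-- Port of A: one loop over li; split each string on ',' and append fields 0,1,2.
def create_lists (li : List String) : List String × List String × List String :=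
  li.foldl
    (fun acc s =>
      let p := (PySem.Str.split? s ",").getD []
      (acc.1 ++ [PySem.List.pyGetD p 0 ""],
       acc.2.1 ++ [PySem.List.pyGetD p 1 ""],
       acc.2.2 ++ [PySem.List.pyGetD p 2 ""]))
    ([], [], [])

-- ===== PORT B =====
-- Port of B's per-row work: locate the first three commas, slice the fields out.
-- s.index(',', start) is ported as PySem.Str.find/findFrom (the PySem mapping for
-- str.index); where Python B raises ValueError the input is outside Pre_.
def pvRowB (s : String) : String × String × String :=
  let i := PySem.Str.find s ","
  let j := PySem.Str.findFrom s "," (i + 1) none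
  let k := PySem.Str.findFrom s "," (j + 1) none
  (PySem.Str.slice s none (some i),
   PySem.Str.slice s (some (i + 1)) (some j),
   if k == -1 then PySem.Str.slice s (some (j + 1)) none
   else PySem.Str.slice s (some (j + 1)) (some k))

def create_lists_alt (li : List String) : List String × List String × List String :=
  li.foldl
    (fun acc s =>
      (acc.1 ++ [(pvRowB s).1], acc.2.1 ++ [(pvRowB s).2.1], acc.2.2 ++ [(pvRowB s).2.2]))
    ([], [], [])

-- ===== PRECONDITION & SPEC =====
-- Pre_ excludes inputs containing a string with fewer than two commas: there both
-- programs raise (A an IndexError at str[1]/str[2], B a ValueError from str.index).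
def Pre_create_lists (li : List String) : Prop :=
  ∀ s ∈ li, 3 ≤ ((PySem.Str.split? s ",").getD []).length
instance (li : List String) : Decidable (Pre_create_lists li) := by unfold Pre_create_lists; infer_instance
def pvWitness_create_lists : List String := ["a,b,c", "1,2,3,4"]
def Spec_create_lists (li : List String) (out : List String × List String × List String) : Prop := out = create_lists_alt li
instance (li : List String) (out : List String × List String × List String) : Decidable (Spec_create_lists li out) := by unfold Spec_create_lists; infer_instance

-- ===== CLAIM (what is proved, stated in full; the proofs are below) =====
def Claim_equal_create_lists : Prop := ∀ (li : List String), Dom_create_lists li → Pre_create_lists li → Spec_create_lists li (create_lists li)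

-- ===== LEMMAS AND PROOFS =====
def pvFields (cs : List Char) : List (List Char) :=
  match h : cs.dropWhile (· != ',') with
  | [] => [cs]
  | _ :: rest => cs.takeWhile (· != ',') :: pvFields rest
termination_by cs.length
decreasing_by
  have h1 : (cs.dropWhile (· != ',')).length ≤ cs.length := cs.length_dropWhile_le _
  simp [h] at h1; omega

theorem pvFields_head (cs : List Char) :
    pvFields cs = cs.takeWhile (· != ',') :: (pvFields cs).tail := by
  unfold pvFields
  split
  · next h =>
      have := List.takeWhile_append_dropWhile (p := (· != ',')) (l := cs)
      rw [h, List.append_nil] at this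
      simp [this]
  · rfl

theorem pvFields_comma (rest : List Char) : pvFields (',' :: rest) = [] :: pvFields rest := by
  rw [pvFields]
  split
  · next h => simp at h
  · next l r h => simp_all

theorem go_nil (fuel : Nat) (cur : List Char) (acc : List (List Char)) :
    PySem.Chars.splitOn.go [','] (fuel+1) [] cur acc = (cur.reverse :: acc).reverse := by
  rw [PySem.Chars.splitOn.go]; simp

theorem go_comma (fuel : Nat) (rest cur : List Char) (acc : List (List Char)) :
    PySem.Chars.splitOn.go [','] (fuel+1) (',' :: rest) cur acc
      = PySem.Chars.splitOn.go [','] fuel rest [] (cur.reverse :: acc) := by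
  rw [PySem.Chars.splitOn.go]; simp [List.isPrefixOf]

theorem go_other (fuel : Nat) (c : Char) (rest cur : List Char) (acc : List (List Char)) (h : c ≠ ',') :
    PySem.Chars.splitOn.go [','] (fuel+1) (c :: rest) cur acc
      = PySem.Chars.splitOn.go [','] fuel rest (c :: cur) acc := by
  rw [PySem.Chars.splitOn.go]
  simp [List.isPrefixOf]
  intro h'; exact absurd h'.symm h

theorem pvFields_tail_cons (x : Char) (rest : List Char) (hx : x ≠ ',') :
    (pvFields (x :: rest)).tail = (pvFields rest).tail := by
  have hd : (x :: rest).dropWhile (· != ',') = rest.dropWhile (· != ',') := by simp [hx]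
  rw [pvFields, pvFields]
  split
  · next h =>
      rw [hd] at h
      split
      · simp
      · next h2 => rw [h] at h2; exact absurd h2 (by simp)
  · next l r h =>
      rw [hd] at h
      split
      · next h2 => rw [h] at h2; exact absurd h2.symm (by simp)
      · next l2 r2 h2 => rw [h] at h2; simp_all

theorem pvSplitOn_go_eq (cs : List Char) : ∀ (fuel : Nat) (cur : List Char) (acc : List (List Char)),
    cs.length < fuel →
    PySem.Chars.splitOn.go [','] fuel cs cur acc
      = acc.reverse ++ (cur.reverse ++ cs.takeWhile (· != ',')) :: (pvFields cs).tail := by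
  induction cs with
  | nil =>
      intro fuel cur acc hf
      obtain ⟨f, rfl⟩ : ∃ f, fuel = f + 1 := ⟨fuel - 1, by omega⟩
      rw [go_nil]
      simp [pvFields]
  | cons x rest ih =>
      intro fuel cur acc hf
      obtain ⟨f, rfl⟩ : ∃ f, fuel = f + 1 := ⟨fuel - 1, by omega⟩
      have hr : rest.length < f := by simp at hf; omega
      by_cases hx : x = ','
      · subst hx
        rw [go_comma, ih f [] (cur.reverse :: acc) hr, pvFields_comma]
        simp [← pvFields_head]
      · rw [go_other _ _ _ _ _ hx, ih f (x :: cur) acc hr]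
        simp [hx, pvFields_tail_cons x rest hx]

theorem pvSplitOn_eq (cs : List Char) : PySem.Chars.splitOn cs [','] = pvFields cs := by
  unfold PySem.Chars.splitOn
  rw [pvSplitOn_go_eq cs (cs.length + 1) [] [] (by omega)]
  simp [← pvFields_head]

theorem pvFields_ne_nil (cs : List Char) : pvFields cs ≠ [] := by
  rw [pvFields_head]; simp

theorem pvDropWhile_head_false (cs : List Char) (d : Char) (rest : List Char)
    (h : cs.dropWhile (· != ',') = d :: rest) : (d != ',') = false := by
  induction cs with
  | nil => simp at h
  | cons x xs ih =>
      rw [List.dropWhile_cons] at h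
      by_cases hx : (x != ',') = true
      · rw [if_pos hx] at h; exact ih h
      · rw [if_neg hx] at h; cases h; simpa using hx

theorem pvFields_decomp (cs f0 : List Char) (fs : List (List Char))
    (h : pvFields cs = f0 :: fs) (hne : fs ≠ []) :
    (∀ x ∈ f0, x ≠ ',') ∧ ∃ cs', cs = f0 ++ ',' :: cs' ∧ pvFields cs' = fs := by
  rw [pvFields] at h
  split at h
  · next hd => simp at h; exact absurd h.2 hne
  · next d rest hd =>
      rw [List.cons.injEq] at h
      obtain ⟨h1, h2⟩ := h
      have hdc : d = ',' := by
        have := pvDropWhile_head_false cs d rest hd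
        simpa using this
      refine ⟨fun x hx => ?_, rest, ?_, h2⟩
      · have := List.mem_takeWhile_imp (h1 ▸ hx); simpa using this
      · subst hdc h1
        conv_lhs => rw [← List.takeWhile_append_dropWhile (p := (· != ',')) (l := cs)]
        rw [hd]

theorem pvFields_single (cs f : List Char) (h : pvFields cs = [f]) :
    cs = f ∧ ∀ x ∈ f, x ≠ ',' := by
  rw [pvFields] at h
  split at h
  · next hd =>
      simp at h; subst h
      refine ⟨rfl, fun x hx => ?_⟩
      have := (List.dropWhile_eq_nil_iff.mp hd) x hx
      simpa using this
  · next d rest hd =>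
      simp at h
      exact absurd h.2 (pvFields_ne_nil rest)

def pvRowA (s : String) : String × String × String :=
  let p := (PySem.Str.split? s ",").getD []
  (PySem.List.pyGetD p 0 "", PySem.List.pyGetD p 1 "", PySem.List.pyGetD p 2 "")

theorem pvFind_none (f : List Char) (hf : ∀ x ∈ f, x ≠ ',') :
    PySem.Chars.find f [','] = -1 := by
  rw [PySem.Chars.find_eq_neg_one_iff]
  rintro ⟨u, v, huv⟩
  exact hf ',' (by rw [← huv]; simp) rfl

theorem pvFind_append (f0 rest : List Char) (hf0 : ∀ x ∈ f0, x ≠ ',') :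
    PySem.Chars.find (f0 ++ ',' :: rest) [','] = (f0.length : Int) := by
  have hinf : ([','] : List Char) <:+: (f0 ++ ',' :: rest) := ⟨f0, rest, by simp⟩
  have hpos : 0 ≤ PySem.Chars.find (f0 ++ ',' :: rest) [','] :=
    (PySem.Chars.find_nonneg_iff _ _).mpr hinf
  obtain ⟨hpre, hmin⟩ := PySem.Chars.find_spec hpos
  set n := (PySem.Chars.find (f0 ++ ',' :: rest) [',']).toNat with hn
  have hle : n ≤ f0.length := by
    by_contra hgt
    exact hmin f0.length (by omega) (by rw [List.drop_left]; exact ⟨rest, rfl⟩)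
  have hge : ¬ n < f0.length := by
    intro hlt
    obtain ⟨t, ht⟩ := hpre
    rw [List.drop_append_of_le_length (by omega), List.drop_eq_getElem_cons hlt] at ht
    rw [List.singleton_append] at ht
    injection ht with h1 h2
    exact hf0 f0[n] (List.getElem_mem _) h1.symm
  omega

theorem pvFindFrom_eq (cs pre suf : List Char) (hsplit : cs = pre ++ suf) :
    PySem.Chars.findFrom cs [','] (pre.length : Int) none
      = if PySem.Chars.find suf [','] = -1 then -1
        else (pre.length : Int) + PySem.Chars.find suf [','] := by
  rw [PySem.Chars.findFrom_natCast cs [','] pre.length (by rw [hsplit]; simp)]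
  rw [hsplit, List.drop_left' rfl]

theorem pvRow_eq (s : String) (h : 3 ≤ ((PySem.Str.split? s ",").getD []).length) :
    pvRowA s = pvRowB s := by
  have hsp : (PySem.Str.split? s ",").getD [] = (pvFields s.toList).map String.ofList := by
    simp [PySem.Str.split?, PySem.Chars.split?, pvSplitOn_eq]
  have hl : 3 ≤ (pvFields s.toList).length := by
    rw [hsp] at h; simpa using h
  obtain ⟨f0, f1, f2, t, hm⟩ : ∃ f0 f1 f2 t, pvFields s.toList = f0 :: f1 :: f2 :: t := by
    rcases hmm : pvFields s.toList with _ | ⟨a, _ | ⟨b, _ | ⟨c, r⟩⟩⟩ <;> rw [hmm] at hl <;>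
      simp at hl
    exact ⟨a, b, c, r, rfl⟩
  obtain ⟨hf0, cs1, hcs1, hfs1⟩ := pvFields_decomp _ _ _ hm (by simp)
  obtain ⟨hf1, cs2, hcs2, hfs2⟩ := pvFields_decomp _ _ _ hfs1 (by simp)
  have hL1 : s.toList = (f0 ++ [',']) ++ cs1 := by rw [hcs1]; simp
  have hL2 : s.toList = (f0 ++ [','] ++ f1 ++ [',']) ++ cs2 := by
    rw [hcs1, hcs2]; simp
  have hi : PySem.Chars.find s.toList [','] = (f0.length : Int) := by
    rw [hcs1]; exact pvFind_append f0 cs1 hf0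
  have hc1 : (f0.length : Int) + 1 = (((f0 ++ [',']).length : Nat) : Int) := by
    simp
  have hj : PySem.Chars.findFrom s.toList [','] ((f0.length : Int) + 1) none
      = ((f0.length + 1 + f1.length : Nat) : Int) := by
    rw [hc1, pvFindFrom_eq s.toList (f0 ++ [',']) cs1 hL1, hcs2,
      pvFind_append f1 cs2 hf1]
    have h0 : (0 : Int) ≤ (f1.length : Int) := Int.natCast_nonneg _
    rw [if_neg (by omega)]
    push_cast [List.length_append, List.length_singleton]; omega
  have hc2 : ((f0.length + 1 + f1.length : Nat) : Int) + 1
      = (((f0 ++ [','] ++ f1 ++ [',']).length : Nat) : Int) := by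
    push_cast; simp; ring
  -- the three slice values
  have hs1 : PySem.Chars.slice s.toList none (some (f0.length : Int)) = f0 := by
    rw [PySem.Chars.slice_eq_listSlice, PySem.List.slice_to _ (Int.natCast_nonneg _)]
    rw [Int.toNat_natCast, hcs1]
    exact List.take_left ..
  have hs2 : PySem.Chars.slice s.toList (some ((f0.length : Int) + 1))
      (some ((f0.length + 1 + f1.length : Nat) : Int)) = f1 := by
    rw [hc1, PySem.Chars.slice_eq_listSlice, PySem.List.slice_natCast]
    rw [hL1, List.drop_left' rfl, hcs2]
    have : (f0.length + 1 + f1.length) - (f0 ++ [',']).length = f1.length := by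
      simp only [List.length_append, List.length_singleton]; omega
    rw [this]
    exact List.take_left ..
  have hA : pvRowA s = (String.ofList f0, String.ofList f1, String.ofList f2) := by
    simp [pvRowA, hsp, hm, pysem]
  rw [hA]
  cases t with
  | nil =>
      obtain ⟨hcs2f, hf2⟩ := pvFields_single _ _ hfs2
      have hk : PySem.Chars.findFrom s.toList [',']
          (((f0.length + 1 + f1.length : Nat) : Int) + 1) none = -1 := by
        rw [hc2, pvFindFrom_eq s.toList (f0 ++ [','] ++ f1 ++ [',']) cs2 hL2]
        rw [hcs2f, pvFind_none f2 hf2, if_pos rfl]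
      have hs3 : PySem.Chars.slice s.toList
          (some (((f0.length + 1 + f1.length : Nat) : Int) + 1)) none = f2 := by
        rw [hc2, PySem.Chars.slice_eq_listSlice,
          PySem.List.slice_from _ (Int.natCast_nonneg _), Int.toNat_natCast,
          hL2, List.drop_left' rfl, hcs2f]
      simp only [pvRowB, PySem.Str.find, PySem.Str.findFrom, PySem.Str.slice]
      rw [show String.toList "," = [','] from rfl, hi, hj, hk]
      simp only [hs1, hs2, hs3]
      simp
  | cons f3 t' =>
      obtain ⟨hf2, cs3, hcs3, _⟩ := pvFields_decomp _ _ _ hfs2 (by simp)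
      have hk : PySem.Chars.findFrom s.toList [',']
          (((f0.length + 1 + f1.length : Nat) : Int) + 1) none
          = ((f0.length + 1 + f1.length + 1 + f2.length : Nat) : Int) := by
        rw [hc2, pvFindFrom_eq s.toList (f0 ++ [','] ++ f1 ++ [',']) cs2 hL2]
        rw [hcs3, pvFind_append f2 cs3 hf2]
        have h0 : (0 : Int) ≤ (f2.length : Int) := Int.natCast_nonneg _
        rw [if_neg (by omega)]
        push_cast [List.length_append, List.length_singleton]; omega
      have hs3 : PySem.Chars.slice s.toList
          (some (((f0.length + 1 + f1.length : Nat) : Int) + 1))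
          (some ((f0.length + 1 + f1.length + 1 + f2.length : Nat) : Int)) = f2 := by
        rw [hc2, PySem.Chars.slice_eq_listSlice, PySem.List.slice_natCast]
        rw [hL2, List.drop_left' rfl, hcs3]
        have : (f0.length + 1 + f1.length + 1 + f2.length)
            - (f0 ++ [','] ++ f1 ++ [',']).length = f2.length := by
          simp only [List.length_append, List.length_singleton]; omega
        rw [this]
        exact List.take_left ..
      have hkne : ((((f0.length + 1 + f1.length + 1 + f2.length : Nat) : Int)) == -1) = false := by
        rw [beq_eq_false_iff_ne]
        push_cast; omega
      simp only [pvRowB, PySem.Str.find, PySem.Str.findFrom, PySem.Str.slice]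
      rw [show String.toList "," = [','] from rfl, hi, hj, hk]
      rw [hkne]
      simp only [hs1, hs2, hs3]
      simp

theorem create_lists_foldl (li : List String) (f : String → String × String × String)
    (a b c : List String) :
    li.foldl (fun acc s => (acc.1 ++ [(f s).1], acc.2.1 ++ [(f s).2.1], acc.2.2 ++ [(f s).2.2])) (a, b, c)
    = (a ++ li.map (fun s => (f s).1), b ++ li.map (fun s => (f s).2.1), c ++ li.map (fun s => (f s).2.2)) := by
  induction li generalizing a b c with
  | nil => simp
  | cons s t ih => simp [List.foldl_cons, ih, List.append_assoc]

-- ===== VERDICT (by name: the statement is the Claim_ definition above) =====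
theorem create_lists_spec : Claim_equal_create_lists := by
  intro li _ hpre
  unfold Spec_create_lists create_lists create_lists_alt
  have hA := create_lists_foldl li pvRowA [] [] []
  have hB := create_lists_foldl li pvRowB [] [] []
  simp only [pvRowA] at hA
  rw [hA, hB]
  have h1 : ∀ s ∈ li, pvRowA s = pvRowB s := fun s hs => pvRow_eq s (hpre s hs)
  refine congrArg₂ _ ?_ (congrArg₂ _ ?_ ?_) <;>
    simp only [List.nil_append] <;>
    exact List.map_congr_left (fun s hs => by rw [← h1 s hs]; rfl)
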